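-- pv_equiv track=rewrite | github.com/GetTalkDrops/plant-intel-mvp | ml-service/ai/pattern_explainer.py | _generate_equipment_nudges
-- ===== SOURCE A (Python) =====
-- from typing import Dict, List, Optional
--
-- def _generate_equipment_nudges(data_gaps: List[Dict]) -> List[Dict]:
--     """Generate nudges for equipment data"""
--     nudges = []
--
--     for gap in data_gaps:
--         if gap['field'] == 'downtime_minutes':
--             nudges.append({
--                 'field': gap['field'],
--                 'message': 'Track equipment downtime for predictive maintenance',
--                 'estimated_value': '$50K-$200K in prevented failures annually',
--                 'implementation': 'Add downtime_minutes column (0 if no downtime)'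
--             })
--         elif gap['field'] == 'last_maintenance_date':
--             nudges.append({
--                 'field': gap['field'],
--                 'message': 'Track maintenance schedule to correlate with issues',
--                 'estimated_value': 'Optimize maintenance timing, reduce breakdowns',
--                 'implementation': 'Add last_maintenance_date (YYYY-MM-DD)'
--             })
--
--     return nudges
-- ===== SOURCE B (Python) =====
-- def _nudges_for_field(field):
--     """Return the list (empty or one-element) of nudges for a single field."""
--     if field == 'downtime_minutes':
--         return [{
--             'field': field,
--             'message': 'Track equipment downtime for predictive maintenance',
--             'estimated_value': '$50K-$200K in prevented failures annually',
--             'implementation': 'Add downtime_minutes column (0 if no downtime)',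
--         }]
--     if field == 'last_maintenance_date':
--         return [{
--             'field': field,
--             'message': 'Track maintenance schedule to correlate with issues',
--             'estimated_value': 'Optimize maintenance timing, reduce breakdowns',
--             'implementation': 'Add last_maintenance_date (YYYY-MM-DD)',
--         }]
--     return []
--
--
-- def _generate_equipment_nudges(data_gaps):
--     """Generate nudges for equipment data, recursively on the gap list."""
--     if not data_gaps:
--         return []
--     return _nudges_for_field(data_gaps[0]['field']) + _generate_equipment_nudges(data_gaps[1:])
-- ===== Notes on version B (the rewrite author's own statement) =====
-- stated objective: alternative
-- what changed: Replaces A's single loop with a mutated accumulator by a structural recursion that concatenates per-gap nudge lists (a flatMap decomposition building the result back-to-front), with the per-field nudge factored into a helper returning a 0- or 1-element list.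
import Mathlib
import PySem

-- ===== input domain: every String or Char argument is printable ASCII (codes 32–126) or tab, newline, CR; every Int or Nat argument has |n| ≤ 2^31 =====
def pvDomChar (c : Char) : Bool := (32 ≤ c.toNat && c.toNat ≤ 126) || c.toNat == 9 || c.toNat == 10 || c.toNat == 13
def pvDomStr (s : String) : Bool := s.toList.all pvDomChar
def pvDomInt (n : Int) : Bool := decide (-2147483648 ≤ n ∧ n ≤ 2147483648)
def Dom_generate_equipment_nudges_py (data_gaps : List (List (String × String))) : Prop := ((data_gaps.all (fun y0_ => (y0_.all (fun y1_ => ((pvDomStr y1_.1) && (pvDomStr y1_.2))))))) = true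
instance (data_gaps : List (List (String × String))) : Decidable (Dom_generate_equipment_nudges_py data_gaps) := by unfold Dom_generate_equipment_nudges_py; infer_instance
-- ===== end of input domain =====

-- B replaces A's accumulator loop by a structural recursion concatenating per-gap nudge lists (objective: alternative decomposition).

-- ===== PORT A =====
-- assoc-list first-match lookup: exact for gap['field'] (dicts arrive as association lists)
def pyLookup {v : Type} (d : List (String × v)) (k : String) : Option v :=
  (d.find? (fun p => p.1 == k)).map (·.2)

-- literal transliteration of A's if/elif chain over an accumulator; gap['field'] = first-match dict lookup
def generate_equipment_nudges_py (data_gaps : List (List (String × String))) : List (List (String × String)) :=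
  data_gaps.foldl (fun nudges gap =>
    match pyLookup gap "field" with
    | none => nudges   -- KeyError in Python; excluded by Pre_
    | some f =>
      if f == "downtime_minutes" then
        nudges ++ [[("field", f),
                    ("message", "Track equipment downtime for predictive maintenance"),
                    ("estimated_value", "$50K-$200K in prevented failures annually"),
                    ("implementation", "Add downtime_minutes column (0 if no downtime)")]]
      else if f == "last_maintenance_date" then
        nudges ++ [[("field", f),
                    ("message", "Track maintenance schedule to correlate with issues"),
                    ("estimated_value", "Optimize maintenance timing, reduce breakdowns"),
                    ("implementation", "Add last_maintenance_date (YYYY-MM-DD)")]]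
      else nudges) []

-- ===== PORT B =====
-- B's helper: the 0- or 1-element nudge list for a single field
def nudgesForField (field : String) : List (List (String × String)) :=
  if field == "downtime_minutes" then
    [[("field", field),
      ("message", "Track equipment downtime for predictive maintenance"),
      ("estimated_value", "$50K-$200K in prevented failures annually"),
      ("implementation", "Add downtime_minutes column (0 if no downtime)")]]
  else if field == "last_maintenance_date" then
    [[("field", field),
      ("message", "Track maintenance schedule to correlate with issues"),
      ("estimated_value", "Optimize maintenance timing, reduce breakdowns"),
      ("implementation", "Add last_maintenance_date (YYYY-MM-DD)")]]
  else []

-- B: structural recursion on the gap list, concatenating the per-gap lists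
def generate_equipment_nudges_py_alt (data_gaps : List (List (String × String))) : List (List (String × String)) :=
  match data_gaps with
  | [] => []
  | gap :: rest =>
    (match pyLookup gap "field" with
     | none => []   -- KeyError in Python; excluded by Pre_
     | some f => nudgesForField f) ++ generate_equipment_nudges_py_alt rest

-- ===== PRECONDITION & SPEC =====
-- Pre_ excludes exactly the gaps without a 'field' key, on which both Pythons raise KeyError.
def Pre_generate_equipment_nudges_py (data_gaps : List (List (String × String))) : Prop :=
  ∀ gap ∈ data_gaps, (pyLookup gap "field").isSome
instance (data_gaps : List (List (String × String))) : Decidable (Pre_generate_equipment_nudges_py data_gaps) := by unfold Pre_generate_equipment_nudges_py; infer_instance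

def pvWitness_generate_equipment_nudges_py : (List (List (String × String))) :=
  [[("field", "downtime_minutes")], [("field", "other")]]

def Spec_generate_equipment_nudges_py (data_gaps : List (List (String × String))) (out : List (List (String × String))) : Prop := out = generate_equipment_nudges_py_alt data_gaps
instance (data_gaps : List (List (String × String))) (out : List (List (String × String))) : Decidable (Spec_generate_equipment_nudges_py data_gaps out) := by unfold Spec_generate_equipment_nudges_py; infer_instance

-- ===== CLAIM =====
def Claim_equal_generate_equipment_nudges_py : Prop := ∀ (data_gaps : List (List (String × String))), Dom_generate_equipment_nudges_py data_gaps → Pre_generate_equipment_nudges_py data_gaps → Spec_generate_equipment_nudges_py data_gaps (generate_equipment_nudges_py data_gaps)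

-- ===== LEMMAS AND PROOFS =====

-- A's loop body appends exactly B's per-gap list
theorem pv_step_eq (nudges : List (List (String × String))) (gap : List (String × String)) :
    (match pyLookup gap "field" with
     | none => nudges
     | some f =>
       if f == "downtime_minutes" then
         nudges ++ [[("field", f),
                     ("message", "Track equipment downtime for predictive maintenance"),
                     ("estimated_value", "$50K-$200K in prevented failures annually"),
                     ("implementation", "Add downtime_minutes column (0 if no downtime)")]]
       else if f == "last_maintenance_date" then
         nudges ++ [[("field", f),
                     ("message", "Track maintenance schedule to correlate with issues"),
                     ("estimated_value", "Optimize maintenance timing, reduce breakdowns"),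
                     ("implementation", "Add last_maintenance_date (YYYY-MM-DD)")]]
       else nudges)
    = nudges ++ (match pyLookup gap "field" with
                 | none => []
                 | some f => nudgesForField f) := by
  cases pyLookup gap "field" with
  | none => simp
  | some f =>
    unfold nudgesForField
    by_cases h1 : f = "downtime_minutes"
    · simp [h1]
    · by_cases h2 : f = "last_maintenance_date"
      · simp [h1, h2]
      · simp [h1, h2]

-- A's fold from any accumulator is that accumulator followed by B's recursion
theorem pv_foldl_eq (data_gaps : List (List (String × String)))
    (acc : List (List (String × String))) :
    data_gaps.foldl (fun nudges gap =>
      match pyLookup gap "field" with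
      | none => nudges
      | some f =>
        if f == "downtime_minutes" then
          nudges ++ [[("field", f),
                      ("message", "Track equipment downtime for predictive maintenance"),
                      ("estimated_value", "$50K-$200K in prevented failures annually"),
                      ("implementation", "Add downtime_minutes column (0 if no downtime)")]]
        else if f == "last_maintenance_date" then
          nudges ++ [[("field", f),
                      ("message", "Track maintenance schedule to correlate with issues"),
                      ("estimated_value", "Optimize maintenance timing, reduce breakdowns"),
                      ("implementation", "Add last_maintenance_date (YYYY-MM-DD)")]]
        else nudges) acc
    = acc ++ generate_equipment_nudges_py_alt data_gaps := by
  induction data_gaps generalizing acc with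
  | nil => simp [generate_equipment_nudges_py_alt]
  | cons g gs ih =>
    simp only [List.foldl_cons]
    rw [pv_step_eq, ih, generate_equipment_nudges_py_alt, List.append_assoc]

-- ===== VERDICT =====
theorem generate_equipment_nudges_py_spec : Claim_equal_generate_equipment_nudges_py := by
  intro data_gaps _ _
  unfold Spec_generate_equipment_nudges_py generate_equipment_nudges_py
  simpa using pv_foldl_eq data_gaps []
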